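-- pv_equiv track=rewrite | github.com/eamon047/EamonCodingLearning | Python/ReinforcementLearning/run_td.py | parse_ascii
-- ===== SOURCE A (Python) =====
-- def parse_ascii(ascii_maze):
--     """
--     Parse ASCII representation of maze into grid, start, and goal.
--     # = wall, . = free, S = start, G = goal
--     """
--     grid = []
--     start = goal = None
--     for i, row in enumerate(ascii_maze):
--         grid_row = []
--         for j, ch in enumerate(row):
--             if ch == '#':
--                 grid_row.append(1)
--             elif ch == '.' or ch.upper() in ('S', 'G'):
--                 grid_row.append(0)
--                 if ch.upper() == 'S':
--                     start = (i, j)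
--                 elif ch.upper() == 'G':
--                     goal = (i, j)
--             else:
--                 raise ValueError(f" ")
--         grid.append(grid_row)
--     return grid, start, goal
-- ===== SOURCE B (Python) =====
-- def _cell(ch):
--     if ch == '#':
--         return 1
--     if ch in '.SsGg':
--         return 0
--     raise ValueError(" ")
--
--
-- def parse_ascii(ascii_maze):
--     # One validating pass builds the whole grid; a separate pass scans for
--     # the markers (last occurrence in row-major order wins, like A).
--     grid = [[_cell(ch) for ch in row] for row in ascii_maze]
--     start = goal = None
--     for i, row in enumerate(ascii_maze):
--         for j, ch in enumerate(row):
--             if ch in 'Ss':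
--                 start = (i, j)
--             elif ch in 'Gg':
--                 goal = (i, j)
--     return grid, start, goal
-- ===== Notes on version B (the rewrite author's own statement) =====
-- stated objective: simpler
-- what changed: B splits A's single interleaved loop into a validating grid-building comprehension and a separate marker-scanning pass, instead of threading grid_row/start/goal through one nested loop.
import Mathlib
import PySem

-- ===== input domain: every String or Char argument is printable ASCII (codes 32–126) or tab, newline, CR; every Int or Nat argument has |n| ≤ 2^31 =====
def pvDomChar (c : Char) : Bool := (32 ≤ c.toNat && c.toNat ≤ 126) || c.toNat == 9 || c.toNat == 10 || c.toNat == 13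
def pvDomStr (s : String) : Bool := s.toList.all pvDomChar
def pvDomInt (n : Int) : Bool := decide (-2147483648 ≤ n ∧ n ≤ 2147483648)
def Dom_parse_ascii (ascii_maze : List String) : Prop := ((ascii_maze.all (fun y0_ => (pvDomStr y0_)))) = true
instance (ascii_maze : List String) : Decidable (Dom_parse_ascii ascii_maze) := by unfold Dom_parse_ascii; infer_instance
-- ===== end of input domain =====

-- B replaces A's single interleaved nested loop by a validating grid-building pass plus a
-- separate marker-scanning pass (objective: simpler decomposition; return value only).

-- ===== PORT A =====
-- A's inner loop body: state (grid_row, start, goal), one character at column j of row i.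
def pvAcell (i : Int)
    (st : List Int × Option (Int × Int) × Option (Int × Int)) (q : Int × Char) :
    List Int × Option (Int × Int) × Option (Int × Int) :=
  let j := q.1; let ch := q.2
  let grid_row := st.1; let start := st.2.1; let goal := st.2.2
  if ch = '#' then (grid_row ++ [1], start, goal)
  else if ch = '.' ∨ ch.toUpper = 'S' ∨ ch.toUpper = 'G' then
    let grid_row := grid_row ++ [0]
    if ch.toUpper = 'S' then (grid_row, some (i, j), goal)
    else if ch.toUpper = 'G' then (grid_row, start, some (i, j))
    else (grid_row, start, goal)
  else (grid_row, start, goal)  -- Python: raise ValueError — unreachable under Pre_parse_ascii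

-- A's outer loop body: state (grid, start, goal), one row at index i.
def pvArow (st : List (List Int) × Option (Int × Int) × Option (Int × Int)) (p : Int × String) :
    List (List Int) × Option (Int × Int) × Option (Int × Int) :=
  let r := (PySem.List.enumerate p.2.toList).foldl (pvAcell p.1) ([], st.2.1, st.2.2)
  (st.1 ++ [r.1], r.2.1, r.2.2)

def parse_ascii (ascii_maze : List String) :
    List (List Int) × (Option (Int × Int)) × (Option (Int × Int)) :=
  (PySem.List.enumerate ascii_maze).foldl pvArow ([], none, none)

-- ===== PORT B =====
-- B's _cell helper (the raise branch is unreachable under Pre_parse_ascii).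
def pvCell (ch : Char) : Int :=
  if ch = '#' then 1
  else if ch ∈ ['.', 'S', 's', 'G', 'g'] then 0
  else 0  -- Python: raise ValueError — unreachable under Pre_parse_ascii

-- B's marker scan, inner loop body.
def pvBcell (i : Int) (sg : Option (Int × Int) × Option (Int × Int)) (q : Int × Char) :
    Option (Int × Int) × Option (Int × Int) :=
  if q.2 ∈ ['S', 's'] then (some (i, q.1), sg.2)
  else if q.2 ∈ ['G', 'g'] then (sg.1, some (i, q.1))
  else sg

def pvBrow (sg : Option (Int × Int) × Option (Int × Int)) (p : Int × String) :
    Option (Int × Int) × Option (Int × Int) :=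
  (PySem.List.enumerate p.2.toList).foldl (pvBcell p.1) sg

def parse_ascii_alt (ascii_maze : List String) :
    List (List Int) × (Option (Int × Int)) × (Option (Int × Int)) :=
  let grid := ascii_maze.map (fun row => row.toList.map pvCell)
  let sg := (PySem.List.enumerate ascii_maze).foldl pvBrow (none, none)
  (grid, sg.1, sg.2)

-- ===== PRECONDITION & SPEC =====
-- Pre_ excludes exactly the inputs containing a character other than '#', '.', 'S', 's', 'G', 'g':
-- on those A raises ValueError and B raises ValueError too.
def Pre_parse_ascii (ascii_maze : List String) : Prop :=
  (ascii_maze.all (fun s => s.toList.all (fun c => c ∈ ['#', '.', 'S', 's', 'G', 'g']))) = true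
instance (ascii_maze : List String) : Decidable (Pre_parse_ascii ascii_maze) := by
  unfold Pre_parse_ascii; infer_instance

def pvWitness_parse_ascii : List String := ["#.S", "g.#"]

def Spec_parse_ascii (ascii_maze : List String) (out : List (List Int) × (Option (Int × Int)) × (Option (Int × Int))) : Prop := out = parse_ascii_alt ascii_maze
instance (ascii_maze : List String) (out : List (List Int) × (Option (Int × Int)) × (Option (Int × Int))) : Decidable (Spec_parse_ascii ascii_maze out) := by unfold Spec_parse_ascii; infer_instance

-- ===== CLAIM (what is proved, stated in full; the proofs are below) =====
def Claim_equal_parse_ascii : Prop := ∀ (ascii_maze : List String), Dom_parse_ascii ascii_maze → Pre_parse_ascii ascii_maze → Spec_parse_ascii ascii_maze (parse_ascii ascii_maze)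

-- ===== LEMMAS AND PROOFS =====

-- A's inner loop = (grid_row extended by the cell values) paired with B's marker scan.
theorem pvInner_eq (i : Int) (cs : List Char) (j : Int) (acc : List Int)
    (sg : Option (Int × Int) × Option (Int × Int))
    (h : cs.all (fun c => c ∈ ['#', '.', 'S', 's', 'G', 'g']) = true) :
    (PySem.List.enumerate cs j).foldl (pvAcell i) (acc, sg) =
      (acc ++ cs.map pvCell, (PySem.List.enumerate cs j).foldl (pvBcell i) sg) := by
  induction cs generalizing j acc sg with
  | nil => simp [PySem.List.enumerate_nil]
  | cons c cs ih =>
    simp only [List.all_cons, Bool.and_eq_true] at h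
    obtain ⟨hc, hcs⟩ := h
    simp only [PySem.List.enumerate_cons, List.foldl_cons]
    have hc' : c = '#' ∨ c = '.' ∨ c = 'S' ∨ c = 's' ∨ c = 'G' ∨ c = 'g' := by
      simpa using hc
    have e1 : 'S'.toUpper = 'S' := by decide
    have e2 : 's'.toUpper = 'S' := by decide
    have e3 : 'G'.toUpper = 'G' := by decide
    have e4 : 'g'.toUpper = 'G' := by decide
    have e6 : '.'.toUpper = '.' := by decide
    rcases hc' with rfl | rfl | rfl | rfl | rfl | rfl <;>
      simp [pvAcell, pvBcell, pvCell, e1, e2, e3, e4, e6, ih _ _ _ hcs]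

-- A's outer loop = (grid extended by the mapped rows) paired with B's marker scan.
theorem pvOuter_eq (rows : List String) (i : Int) (acc : List (List Int))
    (sg : Option (Int × Int) × Option (Int × Int))
    (h : rows.all (fun s => s.toList.all (fun c => c ∈ ['#', '.', 'S', 's', 'G', 'g'])) = true) :
    (PySem.List.enumerate rows i).foldl pvArow (acc, sg) =
      (acc ++ rows.map (fun row => row.toList.map pvCell),
        (PySem.List.enumerate rows i).foldl pvBrow sg) := by
  induction rows generalizing i acc sg with
  | nil => simp [PySem.List.enumerate_nil]
  | cons r rs ih =>
    simp only [List.all_cons, Bool.and_eq_true] at h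
    obtain ⟨hr, hrs⟩ := h
    simp only [PySem.List.enumerate_cons, List.foldl_cons]
    have step : pvArow (acc, sg) (i, r) = (acc ++ [r.toList.map pvCell], pvBrow sg (i, r)) := by
      simp only [pvArow, pvBrow]
      rw [pvInner_eq (h := hr)]
      simp
    rw [step, ih _ _ _ hrs]
    simp [List.map_cons]

-- ===== VERDICT (by name: the statement is the Claim_ definition above) =====
theorem parse_ascii_spec : Claim_equal_parse_ascii := by
  intro m _ hpre
  unfold Spec_parse_ascii parse_ascii parse_ascii_alt
  have := pvOuter_eq m 0 [] (none, none) hpre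
  simp only [List.nil_append] at this
  rw [this]
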